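-- pv_equiv track=rewrite | github.com/marinaariasq/dataframe_analysis | popularity_analyzer.py | __create_ordered_dictionary
-- ===== SOURCE A (Python) =====
-- from collections import OrderedDict
--
-- def __create_ordered_dictionary(popularity_matrix):
--     """
--     This function returns a sorted dictionary from a list of lists. This dictionary will contain as key all the
--     types of objects present in the lists of the list and each key will have as value the total number of times
--     this object have appeared in the lists.
--
--     Inputs:
--     popularity_matrix: [list] list that contains the lists of the most popular object_names for each file_name
--
--     Outputs:
--     dict_ordered_popular_objects: [OrderedDict] ordered dictionary of the object_names popularity
--     """
--     dict_popular_objects = OrderedDict()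
--     for top_objects in popularity_matrix:
--         for object_name in top_objects:
--             dict_popular_objects[object_name] = dict_popular_objects.get(object_name, 0) + 1
--     dict_ordered_popular_objects = OrderedDict(
--         sorted(dict_popular_objects.items(), key=lambda item: item[1], reverse=True))
--     return dict_ordered_popular_objects
-- ===== SOURCE B (Python) =====
-- from collections import OrderedDict
--
-- def __create_ordered_dictionary(popularity_matrix):
--     # Count occurrences in insertion order, then bucket the items by their count
--     # and emit the buckets from the maximum count down to 1 instead of
--     # comparison-sorting the items.
--     counts = OrderedDict()
--     for top_objects in popularity_matrix:
--         for object_name in top_objects: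
--             counts[object_name] = counts.get(object_name, 0) + 1
--     mx = max(counts.values(), default=0)
--     buckets = {}
--     for name, k in counts.items():
--         buckets.setdefault(k, []).append((name, k))
--     pairs = []
--     for c in range(mx, 0, -1):
--         pairs += buckets.get(c, [])
--     return OrderedDict(pairs)
-- ===== Notes on version B (the rewrite author's own statement) =====
-- stated objective: alternative
-- what changed: Replaces the stable comparison sort by count with a bucket sort: after building the count dict, B groups the items into per-count buckets in one pass (insertion order preserved) and emits the buckets from the maximum count down to 1, which reproduces the stable descending sort exactly.
import Mathlib
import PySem

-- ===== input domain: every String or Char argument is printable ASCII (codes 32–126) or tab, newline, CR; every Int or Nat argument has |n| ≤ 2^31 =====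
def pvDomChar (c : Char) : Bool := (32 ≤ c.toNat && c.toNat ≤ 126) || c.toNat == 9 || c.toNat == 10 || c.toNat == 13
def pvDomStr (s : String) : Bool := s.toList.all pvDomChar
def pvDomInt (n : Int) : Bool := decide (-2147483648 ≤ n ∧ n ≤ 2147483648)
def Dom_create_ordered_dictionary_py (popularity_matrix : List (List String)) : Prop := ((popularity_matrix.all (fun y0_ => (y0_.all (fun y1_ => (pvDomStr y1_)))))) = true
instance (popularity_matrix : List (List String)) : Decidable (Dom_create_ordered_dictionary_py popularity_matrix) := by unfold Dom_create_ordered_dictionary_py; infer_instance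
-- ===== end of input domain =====

-- B replaces A's stable descending comparison sort by a bucket emission over count
-- values from the maximum down to 1 (alternative decomposition, same return value).

-- ===== PORT A =====
-- the counting loop shared by both Python sources (both build the dict the same way)
def pvCounts (popularity_matrix : List (List String)) : PySem.Dict String Int :=
  popularity_matrix.foldl
    (fun d top_objects =>
      top_objects.foldl (fun d object_name => d.insert object_name (d.getD object_name 0 + 1)) d)
    PySem.Dict.empty

def create_ordered_dictionary_py (popularity_matrix : List (List String)) : List (String × Int) :=
  let dict_popular_objects := pvCounts popularity_matrix
  (PySem.List.sorted dict_popular_objects.items (fun item => item.2) true)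

-- ===== PORT B =====
def create_ordered_dictionary_py_alt (popularity_matrix : List (List String)) : List (String × Int) :=
  let counts := pvCounts popularity_matrix
  let mx : Int := match PySem.List.max? counts.values (fun v => v) with
    | some v => v
    | none => 0
  let buckets := counts.items.foldl
    (fun b p => b.modify p.2 [] (fun t => t ++ [p])) PySem.Dict.empty
  let pairs := (PySem.List.pyRange mx 0 (-1)).foldl (fun acc c => acc ++ buckets.getD c []) []
  (PySem.Dict.ofList pairs).items

-- ===== PRECONDITION & SPEC =====
def Spec_create_ordered_dictionary_py (popularity_matrix : List (List String)) (out : List (String × Int)) : Prop := out = create_ordered_dictionary_py_alt popularity_matrix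
instance (popularity_matrix : List (List String)) (out : List (String × Int)) : Decidable (Spec_create_ordered_dictionary_py popularity_matrix out) := by unfold Spec_create_ordered_dictionary_py; infer_instance

-- ===== CLAIM (what is proved, stated in full; the proofs are below) =====
def Claim_equal_create_ordered_dictionary_py : Prop := ∀ (popularity_matrix : List (List String)), Dom_create_ordered_dictionary_py popularity_matrix → Spec_create_ordered_dictionary_py popularity_matrix (create_ordered_dictionary_py popularity_matrix)

-- ===== LEMMAS AND PROOFS =====

-- insertBy skips a prefix it is not placed before
theorem pv_insertBy_append {α : Type} (before : α → α → Bool) (x : α) (ys zs : List α)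
    (h : ∀ y ∈ ys, before x y = false) :
    PySem.List.insertBy before x (ys ++ zs) = ys ++ PySem.List.insertBy before x zs := by
  induction ys with
  | nil => simp
  | cons y t ih =>
    have hy := h y (by simp)
    simp [PySem.List.insertBy, hy, ih (fun z hz => h z (by simp [hz]))]

-- insertBy goes to the front when it precedes everything
theorem pv_insertBy_front {α : Type} (before : α → α → Bool) (x : α) (zs : List α)
    (h : ∀ z ∈ zs, before x z = true) :
    PySem.List.insertBy before x zs = x :: zs := by
  cases zs with
  | nil => rfl
  | cons z t => simp [PySem.List.insertBy, h z (by simp)]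

-- inserting x into the bucket concatenation lands at the end of x's own bucket
theorem pv_emit (cs : List Int) (hcs : cs.Pairwise (fun a b => b < a))
    (x : String × Int) (hx : x.2 ∈ cs) (l : List (String × Int)) :
    PySem.List.insertBy (fun a b => decide (b.2 < a.2)) x
      (cs.flatMap (fun c => l.filter (fun p => p.2 == c)))
    = cs.flatMap (fun c => (l ++ [x]).filter (fun p => p.2 == c)) := by
  induction cs with
  | nil => cases hx
  | cons c cs ih =>
    have hlt : ∀ c' ∈ cs, c' < c := fun c' h' => (List.pairwise_cons.mp hcs).1 c' h'
    rcases List.mem_cons.mp hx with hxc | hxcs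
    · -- x belongs to the head bucket
      have h1 : ∀ y ∈ l.filter (fun p => p.2 == c), (fun a b => decide ((b:String×Int).2 < a.2)) x y = false := by
        intro y hy
        have : y.2 = c := by simpa using (List.of_mem_filter hy)
        simp [this, hxc]
      have h2 : ∀ z ∈ cs.flatMap (fun c => l.filter (fun p => p.2 == c)),
          (fun a b => decide ((b:String×Int).2 < a.2)) x z = true := by
        intro z hz
        rcases List.mem_flatMap.mp hz with ⟨c', hc', hz'⟩
        have hz2 : z.2 = c' := by simpa using (List.of_mem_filter hz')
        simp [hz2, hxc]
        exact hlt c' hc'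
      have htail : ∀ c' ∈ cs, ((l ++ [x]).filter (fun p => p.2 == c')) = l.filter (fun p => p.2 == c') := by
        intro c' hc'
        have : ¬ (x.2 = c') := by
          have := hlt c' hc'; omega
        simp [List.filter_append, this]
      simp only [List.flatMap_cons]
      rw [pv_insertBy_append _ _ _ _ h1, pv_insertBy_front _ _ _ h2]
      rw [show (cs.flatMap (fun c' => (l ++ [x]).filter (fun p => p.2 == c'))) = cs.flatMap (fun c' => l.filter (fun p => p.2 == c')) from List.flatMap_congr (fun c' hc' => htail c' hc')]
      simp [List.filter_append, hxc]
    · -- x belongs to a later bucket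
      have hxlt : x.2 < c := hlt _ hxcs
      have h1 : ∀ y ∈ l.filter (fun p => p.2 == c), (fun a b => decide ((b:String×Int).2 < a.2)) x y = false := by
        intro y hy
        have : y.2 = c := by simpa using (List.of_mem_filter hy)
        simp [this]; omega
      have hne : ¬ (x.2 = c) := by omega
      simp only [List.flatMap_cons]
      rw [pv_insertBy_append _ _ _ _ h1, ih (List.pairwise_cons.mp hcs).2 hxcs]
      simp [List.filter_append, hne]

-- stable reverse sort by count = bucket concatenation over a strictly descending cover
theorem pv_sort_eq_flatMap (cs : List Int) (hcs : cs.Pairwise (fun a b => b < a))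
    (l : List (String × Int)) (hl : ∀ p ∈ l, p.2 ∈ cs) :
    PySem.List.sorted l (fun p => p.2) true = cs.flatMap (fun c => l.filter (fun p => p.2 == c)) := by
  induction l using List.reverseRecOn with
  | nil =>
    rw [PySem.List.sorted_rev_eq_foldl_insertBy]
    simp
  | append_singleton l x ih =>
    rw [PySem.List.sorted_rev_eq_foldl_insertBy, List.foldl_append]
    simp only [List.foldl_cons, List.foldl_nil]
    rw [← PySem.List.sorted_rev_eq_foldl_insertBy,
        ih (fun p hp => hl p (by simp [hp]))]
    exact pv_emit cs hcs x (hl x (by simp)) l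

-- invariant of the counting loop: keys are unique and every value is ≥ 1
theorem pv_counts_inv (popularity_matrix : List (List String)) :
    (pvCounts popularity_matrix).keys.Nodup ∧
    (∀ p ∈ (pvCounts popularity_matrix).items, 1 ≤ p.2) := by
  have step : ∀ (d : PySem.Dict String Int) (name : String),
      d.keys.Nodup → (∀ p ∈ d.items, 1 ≤ p.2) →
      (d.insert name (d.getD name 0 + 1)).keys.Nodup ∧
      (∀ p ∈ (d.insert name (d.getD name 0 + 1)).items, 1 ≤ p.2) := by
    intro d name hnd hv
    have hge : 0 ≤ d.getD name 0 := by
      cases h : d.get? name with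
      | none => simp [PySem.Dict.getD, h]
      | some v =>
        have := hv _ (PySem.Dict.mem_items_of_get?_eq_some d h)
        simp only [PySem.Dict.getD, h, Option.getD_some]
        omega
    refine ⟨PySem.Dict.nodup_keys_insert d _ _ hnd, ?_⟩
    intro p hp
    rcases (PySem.Dict.mem_items_insert d _ _ p).mp hp with h | ⟨h, _⟩
    · subst h; simp; omega
    · exact hv p h
  have inner : ∀ (row : List String) (d : PySem.Dict String Int),
      d.keys.Nodup → (∀ p ∈ d.items, 1 ≤ p.2) →
      (row.foldl (fun d object_name => d.insert object_name (d.getD object_name 0 + 1)) d).keys.Nodup ∧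
      (∀ p ∈ (row.foldl (fun d object_name => d.insert object_name (d.getD object_name 0 + 1)) d).items, 1 ≤ p.2) := by
    intro row
    induction row with
    | nil => intro d h1 h2; exact ⟨h1, h2⟩
    | cons a t ih =>
      intro d h1 h2
      have := step d a h1 h2
      exact ih _ this.1 this.2
  have outer : ∀ (m : List (List String)) (d : PySem.Dict String Int),
      d.keys.Nodup → (∀ p ∈ d.items, 1 ≤ p.2) →
      (m.foldl (fun d row => row.foldl (fun d object_name => d.insert object_name (d.getD object_name 0 + 1)) d) d).keys.Nodup ∧
      (∀ p ∈ (m.foldl (fun d row => row.foldl (fun d object_name => d.insert object_name (d.getD object_name 0 + 1)) d) d).items, 1 ≤ p.2) := by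
    intro m
    induction m with
    | nil => intro d h1 h2; exact ⟨h1, h2⟩
    | cons r t ih =>
      intro d h1 h2
      have := inner r d h1 h2
      exact ih _ this.1 this.2
  have he : (PySem.Dict.empty : PySem.Dict String Int).items = [] := rfl
  exact outer popularity_matrix PySem.Dict.empty PySem.Dict.nodup_keys_empty
    (by intro p hp; rw [he] at hp; cases hp)


-- the bucket dict groups the items by their count, keeping insertion order
theorem pv_buckets (l : List (String × Int)) :
    ∀ (b0 : PySem.Dict Int (List (String × Int))) (c : Int),
      (l.foldl (fun b p => b.modify p.2 [] (fun t => t ++ [p])) b0).getD c []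
      = b0.getD c [] ++ l.filter (fun p => p.2 == c) := by
  induction l with
  | nil => intro b0 c; simp
  | cons x t ih =>
    intro b0 c
    simp only [List.foldl_cons, ih]
    unfold PySem.Dict.modify
    by_cases h : c = x.2
    · subst h
      rw [PySem.Dict.getD_insert_self]
      simp
    · rw [PySem.Dict.getD_insert_of_ne _ _ _ h]
      have : (x.2 == c) = false := by simpa using fun hh => h hh.symm
      simp [this]

-- ===== VERDICT (by name: the statement is the Claim_ definition above) =====
theorem create_ordered_dictionary_py_spec : Claim_equal_create_ordered_dictionary_py := by
  intro pm _
  unfold Spec_create_ordered_dictionary_py create_ordered_dictionary_py create_ordered_dictionary_py_alt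
  dsimp only
  obtain ⟨hnd, hpos⟩ := pv_counts_inv pm
  set counts := pvCounts pm with hc
  set mx : Int := (match PySem.List.max? counts.values (fun v => v) with
    | some v => v
    | none => 0) with hmxdef
  -- every stored count lies in (0, mx]
  have hle : ∀ p ∈ counts.items, p.2 ≤ mx := by
    intro p hp
    cases h : PySem.List.max? counts.values (fun v => v) with
    | none =>
      have : counts.values = [] := (PySem.List.max?_eq_none_iff _ _).mp h
      have : counts.items = [] := by
        simpa [PySem.Dict.values] using this
      rw [this] at hp; cases hp
    | some v =>
      have hmax := PySem.List.max?_isMax h p.2 (by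
        simp only [PySem.Dict.values]
        exact List.mem_map.mpr ⟨p, hp, rfl⟩)
      simp only [hmxdef, h]
      exact hmax
  have hmem : ∀ p ∈ counts.items, p.2 ∈ PySem.List.pyRange mx 0 (-1) := by
    intro p hp
    exact PySem.List.mem_pyRange_neg_one.mpr ⟨by have := hpos p hp; omega, hle p hp⟩
  have hcs : (PySem.List.pyRange mx 0 (-1)).Pairwise (fun a b => b < a) := by
    rw [PySem.List.pyRange_neg_one_eq_reverse]
    rw [List.pairwise_reverse]
    exact PySem.List.pairwise_lt_pyRange_one _ _
  -- A's sort is the bucket concatenation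
  have hsort := pv_sort_eq_flatMap (PySem.List.pyRange mx 0 (-1)) hcs counts.items hmem
  -- B's nested append loop builds exactly that concatenation
  have hbuck : ∀ c : Int, (counts.items.foldl
      (fun b p => b.modify p.2 [] (fun t => t ++ [p])) PySem.Dict.empty).getD c []
      = counts.items.filter (fun p => p.2 == c) := by
    intro c
    rw [pv_buckets]
    simp
  have hpairs : ((PySem.List.pyRange mx 0 (-1)).foldl
      (fun acc c => acc ++ (counts.items.foldl
        (fun b p => b.modify p.2 [] (fun t => t ++ [p])) PySem.Dict.empty).getD c []) [])
      = (PySem.List.pyRange mx 0 (-1)).flatMap (fun c => counts.items.filter (fun p => p.2 == c)) := by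
    rw [PySem.List.foldl_append_eq_flatMap]
    simp only [hbuck, List.nil_append]
  rw [hpairs]
  -- the emitted pairs have pairwise-distinct keys, so OrderedDict(pairs) keeps them all
  have hperm : ((PySem.List.pyRange mx 0 (-1)).flatMap
      (fun c => counts.items.filter (fun p => p.2 == c))).Perm counts.items := by
    rw [← hsort]; exact PySem.List.sorted_perm _ _ _
  have hnd' : (counts.items.map (fun p => p.1)).Nodup := hnd
  have hndp : (((PySem.List.pyRange mx 0 (-1)).flatMap
      (fun c => counts.items.filter (fun p => p.2 == c))).map (fun p => p.1)).Nodup :=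
    ((hperm.map (fun p => p.1)).nodup_iff).mpr hnd'
  have hofl := PySem.Dict.items_foldl_insert_fresh
      ((PySem.List.pyRange mx 0 (-1)).flatMap (fun c => counts.items.filter (fun p => p.2 == c)))
      (fun p => p.1) (fun p => p.2) PySem.Dict.empty
      (fun a _ => PySem.Dict.contains_empty _) hndp
  unfold PySem.Dict.ofList PySem.Dict.update
  simp only [hofl]
  simpa using hsort
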